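-- pv_equiv track=rewrite | github.com/yashtamakuwala/COMP9321-Assignment-2 | scripts/explore_crime_buckets.py | decide_bucket
-- ===== SOURCE A (Python) =====
-- def decide_bucket(mean_crime_count):
--     buckets = [250, 500, 1000, 1500]
--     levels = ['Very Low', 'Low', 'Average', 'High', 'Very High']
--     if mean_crime_count <= buckets[0]:
--         return levels[0]
--
--     for index, bucket in enumerate(buckets[1:]):
--         if mean_crime_count > bucket:
--             continue
--
--         return levels[index + 1]
--
--     return levels[-1]
-- ===== SOURCE B (Python) =====
-- import bisect
--
-- def decide_bucket(mean_crime_count):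
--     buckets = [250, 500, 1000, 1500]
--     levels = ['Very Low', 'Low', 'Average', 'High', 'Very High']
--     return levels[bisect.bisect_left(buckets, mean_crime_count)]
-- ===== Notes on version B (the rewrite author's own statement) =====
-- stated objective: idiomatic
-- what changed: Replaced the early-return scan over enumerate(buckets[1:]) with a single table lookup: levels[bisect.bisect_left(buckets, mean_crime_count)].
import Mathlib
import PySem

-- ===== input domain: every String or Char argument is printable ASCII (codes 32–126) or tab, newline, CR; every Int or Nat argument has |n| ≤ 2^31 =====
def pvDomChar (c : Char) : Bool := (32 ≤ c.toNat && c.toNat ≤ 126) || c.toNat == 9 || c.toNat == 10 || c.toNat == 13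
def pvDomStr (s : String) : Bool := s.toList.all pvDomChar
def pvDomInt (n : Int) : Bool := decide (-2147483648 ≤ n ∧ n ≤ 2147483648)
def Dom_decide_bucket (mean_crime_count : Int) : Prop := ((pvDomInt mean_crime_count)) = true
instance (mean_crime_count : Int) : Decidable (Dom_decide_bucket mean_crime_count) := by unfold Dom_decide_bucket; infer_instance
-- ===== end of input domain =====

-- B replaces A's linear scan over the thresholds with a bisect_left lookup into the
-- same table; same value everywhere (idiomatic rewrite, no behaviour change).
-- ===== PORT A =====
-- Port of the for-loop over enumerate(buckets[1:]): continue while mean > bucket,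
-- else return levels[index+1]; falling off the loop returns levels[-1].
def decide_bucket_loop (mean_crime_count : Int) (levels : List String) : List (Int × Int) → String
  | [] => (PySem.List.pyGet? levels (-1)).getD ""
  | (index, bucket) :: rest =>
      if mean_crime_count > bucket then decide_bucket_loop mean_crime_count levels rest
      else (PySem.List.pyGet? levels (index + 1)).getD ""

def decide_bucket (mean_crime_count : Int) : String :=
  let buckets : List Int := [250, 500, 1000, 1500]
  let levels : List String := ["Very Low", "Low", "Average", "High", "Very High"]
  if mean_crime_count ≤ ((PySem.List.pyGet? buckets 0).getD 0) then
    (PySem.List.pyGet? levels 0).getD ""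
  else
    decide_bucket_loop mean_crime_count levels (PySem.List.enumerate (PySem.List.slice buckets (some 1) none))

-- ===== PORT B =====
-- bisect.bisect_left on a sorted list = number of elements strictly below the key.
def pyBisectLeft (xs : List Int) (x : Int) : Nat := (xs.takeWhile (· < x)).length

def decide_bucket_alt (mean_crime_count : Int) : String :=
  let buckets : List Int := [250, 500, 1000, 1500]
  let levels : List String := ["Very Low", "Low", "Average", "High", "Very High"]
  levels.getD (pyBisectLeft buckets mean_crime_count) ""

-- ===== PRECONDITION & SPEC =====
def Spec_decide_bucket (mean_crime_count : Int) (out : String) : Prop := out = decide_bucket_alt mean_crime_count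
instance (mean_crime_count : Int) (out : String) : Decidable (Spec_decide_bucket mean_crime_count out) := by unfold Spec_decide_bucket; infer_instance

-- ===== CLAIM (what is proved, stated in full; the proofs are below) =====
def Claim_equal_decide_bucket : Prop := ∀ (mean_crime_count : Int), Dom_decide_bucket mean_crime_count → Spec_decide_bucket mean_crime_count (decide_bucket mean_crime_count)

-- ===== LEMMAS AND PROOFS =====

-- ===== VERDICT (by name: the statement is the Claim_ definition above) =====
theorem decide_bucket_spec : Claim_equal_decide_bucket := by
  intro m _
  unfold Spec_decide_bucket decide_bucket decide_bucket_alt pyBisectLeft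
  by_cases h1 : m ≤ 250
  · have h1' : ¬ (250 < m) := by omega
    simp [List.takeWhile, PySem.List.pyGet?, PySem.List.pyIdx?, h1, h1']
  · by_cases h2 : m ≤ 500
    · have : 250 < m := by omega
      have h2' : ¬ (500 < m) := by omega
      simp [decide_bucket_loop, List.takeWhile, PySem.List.pyGet?, PySem.List.pyIdx?,
        PySem.List.slice, PySem.List.enumerate, h1, h2', this]
    · by_cases h3 : m ≤ 1000
      · have : 500 < m := by omega
        have h25 : 250 < m := by omega
        have h3' : ¬ (1000 < m) := by omega
        simp [decide_bucket_loop, List.takeWhile, PySem.List.pyGet?, PySem.List.pyIdx?,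
          PySem.List.slice, PySem.List.enumerate, h1, h3', h25, this]
      · by_cases h4 : m ≤ 1500
        · have h5 : 1000 < m := by omega
          have h25 : 250 < m := by omega
          have h50 : 500 < m := by omega
          have h4' : ¬ (1500 < m) := by omega
          simp [decide_bucket_loop, List.takeWhile, PySem.List.pyGet?, PySem.List.pyIdx?,
            PySem.List.slice, PySem.List.enumerate, h1, h4', h25, h50, h5]
        · have h25 : 250 < m := by omega
          have h50 : 500 < m := by omega
          have h10 : 1000 < m := by omega
          have h15 : 1500 < m := by omega
          simp [decide_bucket_loop, List.takeWhile, PySem.List.pyGet?, PySem.List.pyIdx?,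
            PySem.List.slice, PySem.List.enumerate, h1, h25, h50, h10, h15]
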